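-- pv_equiv track=rewrite | github.com/gring2/study_hard | codility/rakuten_test/second/solution.py | solution
-- ===== SOURCE A (Python) =====
-- from collections import Counter
-- from math import factorial
--
-- vowels = ['A', 'E', 'I', 'O', 'U']
--
-- def solution(S):
--     # write your code in Python 3.6
--     vs = []
--     cs = []
--     for c in S:
--         if c in vowels:
--             vs.append(c)
--         else:
--             cs.append(c)
--
--     vs_count = len(vs)
--     cs_count = len(cs)
--
--     if abs(vs_count - cs_count) >= 2:
--         return 0
--     if cs_count == 0:
--         return 0
--
--     return pc(cs) * pc(vs)
--
-- def pc(s):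
--     s = ''.join(s)
--     c = 1
--     for i in Counter(s).values():
--         c *= factorial(i)
--     return factorial(len(s)) // c
-- ===== SOURCE B (Python) =====
-- from collections import Counter
-- from math import comb
--
-- VOWELS = ['A', 'E', 'I', 'O', 'U']
--
-- def solution(S):
--     # One pass over the distinct characters of S: incremental binomial product
--     # per group instead of building group lists and a factorial-ratio multinomial.
--     v_total = c_total = 0
--     v_ways = c_ways = 1
--     for ch, cnt in Counter(S).items():
--         if ch in VOWELS:
--             v_total += cnt
--             v_ways *= comb(v_total, cnt)
--         else:
--             c_total += cnt
--             c_ways *= comb(c_total, cnt)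
--     if c_total == 0 or abs(v_total - c_total) >= 2:
--         return 0
--     return v_ways * c_ways
-- ===== Notes on version B (the rewrite author's own statement) =====
-- stated objective: alternative
-- what changed: Instead of building two group lists and computing each group's multinomial as len!//prod(factorials), B makes a single pass over Counter(S).items(), maintaining per group a running total and an incremental product of binomial coefficients comb(total_so_far, count); it trades the one big factorial division for many big-int binomials, so it is not faster.
import Mathlib
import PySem

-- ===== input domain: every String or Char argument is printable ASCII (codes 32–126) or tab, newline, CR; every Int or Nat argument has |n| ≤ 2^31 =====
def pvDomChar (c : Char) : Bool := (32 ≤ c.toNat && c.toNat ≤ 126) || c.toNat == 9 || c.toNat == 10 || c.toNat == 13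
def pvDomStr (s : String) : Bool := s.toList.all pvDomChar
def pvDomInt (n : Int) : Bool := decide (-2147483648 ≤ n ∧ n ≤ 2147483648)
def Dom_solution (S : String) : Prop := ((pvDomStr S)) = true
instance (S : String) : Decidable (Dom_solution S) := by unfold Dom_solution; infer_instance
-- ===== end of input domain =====

-- B replaces the two group lists and the factorial-ratio multinomial by a single pass over
-- Counter(S).items() that maintains, per group, a running total and an incremental product of
-- binomial coefficients (objective: alternative — same cost, different decomposition).

-- ===== PORT A =====
def pyVowels : List Char := ['A', 'E', 'I', 'O', 'U']

-- pc(s): ''.join(s) yields the same character sequence, so Counter/len act on the list itself.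
-- factorial(i) on a Counter value (a nonnegative int) is ported as Nat.factorial of i.toNat (exact there).
def pcA (s : List Char) : Int :=
  let c : Int :=
    (PySem.Dict.counter s).values.foldl (fun c i => c * ((Nat.factorial i.toNat : Nat) : Int)) 1
  PySem.Int.floordiv ((Nat.factorial s.length : Nat) : Int) c

def solution (S : String) : Int :=
  let acc := S.toList.foldl
    (fun (st : List Char × List Char) c =>
      if pyVowels.contains c then (st.1 ++ [c], st.2) else (st.1, st.2 ++ [c]))
    ([], [])
  let vs := acc.1
  let cs := acc.2
  let vs_count : Int := vs.length
  let cs_count : Int := cs.length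
  if 2 ≤ |vs_count - cs_count| then 0
  else if cs_count = 0 then 0
  else pcA cs * pcA vs

-- ===== PORT B =====
-- math.comb(n, k): exact for 0 ≤ k ≤ n, which holds at every call site here (counts are ≥ 1).
def pyComb (n k : Int) : Int := (Nat.choose n.toNat k.toNat : Int)

def solution_alt (S : String) : Int :=
  let st := (PySem.Dict.counter S.toList).items.foldl
    (fun (st : (Int × Int) × (Int × Int)) kv =>
      if pyVowels.contains kv.1 then
        ((st.1.1 + kv.2, st.1.2 * pyComb (st.1.1 + kv.2) kv.2), st.2)
      else
        (st.1, (st.2.1 + kv.2, st.2.2 * pyComb (st.2.1 + kv.2) kv.2)))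
    ((0, 1), (0, 1))
  if st.2.1 = 0 ∨ 2 ≤ |st.1.1 - st.2.1| then 0
  else st.1.2 * st.2.2

-- ===== PRECONDITION & SPEC =====
def Spec_solution (S : String) (out : Int) : Prop := out = solution_alt S
instance (S : String) (out : Int) : Decidable (Spec_solution S out) := by unfold Spec_solution; infer_instance

-- ===== CLAIM (what is proved, stated in full; the proofs are below) =====
def Claim_equal_solution : Prop := ∀ (S : String), Dom_solution S → Spec_solution S (solution S)

-- ===== LEMMAS AND PROOFS =====

-- A's partition loop produces the two filters.
theorem partition_eq (l : List Char) (a b : List Char) :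
    l.foldl (fun (st : List Char × List Char) c =>
      if pyVowels.contains c then (st.1 ++ [c], st.2) else (st.1, st.2 ++ [c])) (a, b)
    = (a ++ l.filter (fun c => pyVowels.contains c),
       b ++ l.filter (fun c => !pyVowels.contains c)) := by
  induction l generalizing a b with
  | nil => simp
  | cons x xs ih =>
    simp only [List.foldl_cons]
    cases h : pyVowels.contains x
    · have hm : x ∉ pyVowels := by simpa using h
      simp only [Bool.false_eq_true, if_false]
      rw [ih]; simp [hm]
    · have hm : x ∈ pyVowels := by simpa using h
      simp only [if_true]
      rw [ih]; simp [hm]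

-- B's single loop with two independent (total, ways) accumulators splits into two folds
-- over the counts of the vowel items and of the consonant items.
theorem split_fold (l : List (Char × Int)) (a b : Int × Int) :
    l.foldl (fun (st : (Int × Int) × (Int × Int)) kv =>
      if pyVowels.contains kv.1 then
        ((st.1.1 + kv.2, st.1.2 * pyComb (st.1.1 + kv.2) kv.2), st.2)
      else
        (st.1, (st.2.1 + kv.2, st.2.2 * pyComb (st.2.1 + kv.2) kv.2))) (a, b)
    = (((l.filter (fun kv => pyVowels.contains kv.1)).map (·.2)).foldl
         (fun (st : Int × Int) c => (st.1 + c, st.2 * pyComb (st.1 + c) c)) a,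
       ((l.filter (fun kv => !pyVowels.contains kv.1)).map (·.2)).foldl
         (fun (st : Int × Int) c => (st.1 + c, st.2 * pyComb (st.1 + c) c)) b) := by
  induction l generalizing a b with
  | nil => simp
  | cons x xs ih =>
    simp only [List.foldl_cons]
    cases h : pyVowels.contains x.1
    · have hm : x.1 ∉ pyVowels := by simpa using h
      simp only [Bool.false_eq_true, if_false]
      rw [ih]; simp [hm]
    · have hm : x.1 ∈ pyVowels := by simpa using h
      simp only [if_true]
      rw [ih]; simp [hm]

-- Nat-level invariant of the incremental binomial fold: the running "ways" times the product of
-- the factorials of the processed counts equals the factorial of the running total.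
def gN (st : Nat × Nat) (c : Nat) : Nat × Nat := (st.1 + c, st.2 * Nat.choose (st.1 + c) c)

theorem gN_invariant (cn : List Nat) : ∀ (t w : Nat),
    (cn.foldl gN (t, w)).1 = t + cn.sum ∧
    (cn.foldl gN (t, w)).2 * (cn.map Nat.factorial).prod * t.factorial
      = w * (t + cn.sum).factorial := by
  induction cn with
  | nil => intro t w; simp
  | cons c rest ih =>
    intro t w
    obtain ⟨h1, h2⟩ := ih (t + c) (w * Nat.choose (t + c) c)
    have key := Nat.add_choose_mul_factorial_mul_factorial t c
    constructor
    · simp only [List.foldl_cons, gN, h1, List.sum_cons]; omega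
    · apply Nat.eq_of_mul_eq_mul_right (Nat.factorial_pos (t + c))
      simp only [List.foldl_cons, gN, List.map_cons, List.prod_cons, List.sum_cons]
      calc (rest.foldl gN (t + c, w * Nat.choose (t + c) c)).2
              * (c.factorial * (rest.map Nat.factorial).prod) * t.factorial * (t + c).factorial
          = ((rest.foldl gN (t + c, w * Nat.choose (t + c) c)).2
              * (rest.map Nat.factorial).prod * (t + c).factorial) * (c.factorial * t.factorial) := by
            ring
        _ = (w * Nat.choose (t + c) c * (t + c + rest.sum).factorial) * (c.factorial * t.factorial) := by
            rw [h2]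
        _ = w * (t + c + rest.sum).factorial * (Nat.choose (t + c) c * t.factorial * c.factorial) := by
            ring
        _ = w * (t + c + rest.sum).factorial * (t + c).factorial := by rw [key]
        _ = w * (t + (c + rest.sum)).factorial * (t + c).factorial := by rw [Nat.add_assoc]

-- filtering commutes with Python set construction (first occurrences)
theorem add_filter (p : Char → Bool) (s : List Char) (x : Char) :
    (PySem.Set.add s x).filter p
      = if p x then PySem.Set.add (List.filter p s) x else List.filter p s := by
  unfold PySem.Set.add
  by_cases hx : x ∈ s
  · have hc : PySem.Set.contains s x = true := by
      simpa [PySem.Set.contains, List.contains_eq_mem] using hx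
    rw [if_pos hc]
    cases hp : p x
    · simp
    · have hfc : PySem.Set.contains (List.filter p s) x = true := by
        simp [PySem.Set.contains, List.contains_eq_mem, List.mem_filter, hx, hp]
      simp only [hfc, if_true]
  · have hc : PySem.Set.contains s x = false := by
      simpa [PySem.Set.contains, List.contains_eq_mem] using hx
    rw [if_neg (by simpa [PySem.Set.contains, List.contains_eq_mem] using hx)]
    have hfc : PySem.Set.contains (List.filter p s) x = false := by
      simp only [PySem.Set.contains, List.contains_eq_mem, decide_eq_false_iff_not,
        List.mem_filter, not_and]
      intro hmem; exact absurd hmem hx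
    cases hp : p x
    · simp [List.filter_append, hp]
    · simp only [List.filter_append, List.filter_cons, hp, if_true, hfc, Bool.false_eq_true,
        if_false]
      simp

theorem foldl_add_filter (p : Char → Bool) (l : List Char) : ∀ (s : List Char),
    (l.foldl PySem.Set.add s).filter p
      = (l.filter p).foldl PySem.Set.add (List.filter p s) := by
  induction l with
  | nil => intro s; simp
  | cons x xs ih =>
    intro s
    simp only [List.foldl_cons, List.filter_cons]
    rw [ih, add_filter]
    cases hp : p x <;> simp

theorem ofList_filter_set (p : Char → Bool) (xs : List Char) :
    PySem.Set.ofList (xs.filter p) = (PySem.Set.ofList xs).filter p := by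
  rw [PySem.Set.ofList_eq_foldl, PySem.Set.ofList_eq_foldl, foldl_add_filter]
  simp

-- the counts recorded in a Counter add up to the length
theorem sum_counts (l : List Char) :
    ((PySem.Set.ofList l).map (fun k => List.count k l)).sum = l.length := by
  have hperm : (PySem.Set.ofList l).Perm l.dedup := by
    apply List.perm_of_nodup_nodup_toFinset_eq
    · rw [← PySem.List.dedup_eq_ofList]; exact PySem.List.nodup_dedup l
    · exact l.nodup_dedup
    · ext a
      simp [← PySem.List.dedup_eq_ofList, PySem.List.mem_dedup]
  rw [← List.sum_map_count_dedup_eq_length l]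
  exact (hperm.map _).sum_eq

-- the counts of a group, as Counter(group) records them
def countsN (g : List Char) : List Nat := (PySem.Set.ofList g).map (fun k => List.count k g)

theorem countsN_sum (g : List Char) : (countsN g).sum = g.length := sum_counts g

theorem countsN_prod_pos (g : List Char) : 0 < ((countsN g).map Nat.factorial).prod := by
  apply List.prod_pos
  intro n hn
  obtain ⟨m, _, rfl⟩ := List.mem_map.mp hn
  exact Nat.factorial_pos m

theorem floordiv_natCast (a b : Nat) :
    PySem.Int.floordiv (a : Int) (b : Int) = ((a / b : Nat) : Int) := by
  simp [PySem.Int.floordiv, Int.fdiv_eq_ediv]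

-- A's pc equals the Nat-level incremental-binomial fold over the same counts
theorem pcA_eq (g : List Char) :
    pcA g = (((countsN g).foldl gN (0, 1)).2 : Int) := by
  have hv : (PySem.Dict.counter g).values = (countsN g).map (fun n : Nat => (n : Int)) := by
    show ((PySem.Dict.counter g).items.map (·.2)) = _
    rw [PySem.Dict.items_counter, countsN, List.map_map, List.map_map]
    rfl
  have hfold : ∀ (ln : List Nat) (a : Int),
      (ln.map (fun n : Nat => (n : Int))).foldl (fun c i => c * ((Nat.factorial i.toNat : Nat) : Int)) a
        = a * (((ln.map Nat.factorial).prod : Nat) : Int) := by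
    intro ln
    induction ln with
    | nil => intro a; simp
    | cons n rest ih =>
      intro a
      simp only [List.map_cons, List.foldl_cons, List.prod_cons]
      rw [ih]
      push_cast [Int.toNat_natCast]
      ring
  obtain ⟨h1, h2⟩ := gN_invariant (countsN g) 0 1
  have hK : (((countsN g).foldl gN (0, 1)).2) * ((countsN g).map Nat.factorial).prod
      = g.length.factorial := by
    simpa [countsN_sum] using h2
  have hdiv : g.length.factorial / ((countsN g).map Nat.factorial).prod
      = ((countsN g).foldl gN (0, 1)).2 := by
    rw [← hK, Nat.mul_div_cancel _ (countsN_prod_pos g)]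
  unfold pcA
  rw [hv, hfold]
  simp only [one_mul]
  rw [floordiv_natCast, hdiv]

-- the Int-valued incremental fold is the cast of the Nat-valued one
theorem gI_fold_cast (ln : List Nat) : ∀ (t w : Nat),
    (ln.map (fun n : Nat => (n : Int))).foldl
        (fun (st : Int × Int) c => (st.1 + c, st.2 * pyComb (st.1 + c) c)) ((t : Int), (w : Int))
      = (((ln.foldl gN (t, w)).1 : Int), ((ln.foldl gN (t, w)).2 : Int)) := by
  induction ln with
  | nil => intro t w; simp
  | cons c rest ih =>
    intro t w
    simp only [List.map_cons, List.foldl_cons, gN]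
    have e2 : ((w : Int) * pyComb ((t : Int) + (c : Int)) (c : Int))
        = (((w * Nat.choose (t + c) c : Nat)) : Int) := by
      have hpc : pyComb ((t : Int) + (c : Int)) (c : Int)
          = ((Nat.choose (t + c) c : Nat) : Int) := by
        unfold pyComb
        rw [show ((t : Int) + (c : Int)) = (((t + c : Nat)) : Int) by push_cast; ring]
        rw [Int.toNat_natCast, Int.toNat_natCast]
      rw [hpc]; push_cast; ring
    have e1 : ((t : Int) + (c : Int)) = (((t + c : Nat)) : Int) := by push_cast; ring
    rw [e2, e1]
    exact ih (t + c) (w * Nat.choose (t + c) c)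

-- B's per-group fold over the filtered Counter items computes (group length, group ways)
theorem groupB (xs : List Char) (q : Char → Bool) :
    (((PySem.Dict.counter xs).items.filter (fun kv => q kv.1)).map (·.2)).foldl
        (fun (st : Int × Int) c => (st.1 + c, st.2 * pyComb (st.1 + c) c)) (0, 1)
      = (((xs.filter q).length : Int), (((countsN (xs.filter q)).foldl gN (0, 1)).2 : Int)) := by
  have hitems : ((PySem.Dict.counter xs).items.filter (fun kv => q kv.1)).map (·.2)
      = (countsN (xs.filter q)).map (fun n : Nat => (n : Int)) := by
    rw [PySem.Dict.items_counter, List.filter_map, List.map_map]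
    have hcomp : ((fun kv : Char × Int => q kv.1) ∘ fun k => (k, (List.count k xs : Int))) = q := by
      funext k; rfl
    rw [hcomp, countsN, ofList_filter_set, List.map_map]
    apply List.map_congr_left
    intro k hk
    have hq : q k = true := (List.mem_filter.mp hk).2
    simp [List.count_filter hq]
  rw [hitems]
  rw [show ((0 : Int), (1 : Int)) = (((0 : Nat) : Int), ((1 : Nat) : Int)) by norm_num]
  rw [gI_fold_cast (countsN (xs.filter q)) 0 1]
  obtain ⟨h1, _⟩ := gN_invariant (countsN (xs.filter q)) 0 1
  rw [h1]
  simp [countsN_sum]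

-- ===== VERDICT (by name: the statement is the Claim_ definition above) =====
theorem solution_spec : Claim_equal_solution := by
  intro S _
  unfold Spec_solution solution solution_alt
  rw [partition_eq, split_fold,
    groupB S.toList (fun c => pyVowels.contains c),
    groupB S.toList (fun c => !pyVowels.contains c)]
  dsimp only
  simp only [List.nil_append]
  set xs := S.toList
  set vs := xs.filter (fun c => pyVowels.contains c)
  set cs := xs.filter (fun c => !pyVowels.contains c)
  by_cases hg : 2 ≤ |(vs.length : Int) - (cs.length : Int)|
  · simp [hg]
  · by_cases hc : (cs.length : Int) = 0
    · simp [hc]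
    · simp only [hg, hc, if_false, or_self]
      rw [pcA_eq, pcA_eq]
      ring
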